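-- pv_equiv track=rewrite | github.com/SiliconEngine/AdventOfCode2023-Python | Day12/day12_part2.py | chk_done
-- ===== SOURCE A (Python) =====
-- def chk_done(springs, counts):
--     def get_count(chk_list, counts):
--         same_count = 0
--         for idx in range(min(len(chk_list), len(counts))):
--             if chk_list[idx] != counts[idx]:
--                 break
--             same_count += 1
--         return same_count
--
--     chk_list = []
--     hash_count = 0
--     had_q = False
--     for c in springs:
--         if c == ord('?'):
--             #return (False, get_count(chk_list, counts))
--             hash_count = 0
--             had_q = True
--             break
--         elif c == ord('#'):
--             hash_count += 1
--         elif hash_count > 0: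
--             chk_list.append(hash_count)
--             hash_count = 0
--
--     if hash_count > 0:
--         chk_list.append(hash_count)
--
--     return (not had_q and counts == chk_list, get_count(chk_list, counts))
-- ===== SOURCE B (Python) =====
-- def chk_done(springs, counts):
--     # One streaming pass: match '#'-runs against counts on the fly with a cursor j
--     # and a flag ok -- no intermediate group list is ever built.
--     j = 0          # number of groups matched so far (= common-prefix length)
--     ok = True      # every group seen so far matched counts[0..j)
--     run = 0        # current in-progress '#' run
--     for c in springs:
--         if c == ord('?'):
--             return (False, j)
--         if c == ord('#'):
--             run += 1
--         elif run > 0: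
--             if ok and j < len(counts) and counts[j] == run:
--                 j += 1
--             else:
--                 ok = False
--             run = 0
--     if run > 0:
--         if ok and j < len(counts) and counts[j] == run:
--             j += 1
--         else:
--             ok = False
--     return (ok and j == len(counts), j)
-- ===== Notes on version B (the rewrite author's own statement) =====
-- stated objective: alternative
-- what changed: B never builds the group list: a single streaming pass matches each completed '#'-run against counts on the fly via a cursor j and a flag ok (O(1) extra space), whereas A accumulates chk_list and then runs a list-equality test plus a separate prefix-compare helper.
import Mathlib
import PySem

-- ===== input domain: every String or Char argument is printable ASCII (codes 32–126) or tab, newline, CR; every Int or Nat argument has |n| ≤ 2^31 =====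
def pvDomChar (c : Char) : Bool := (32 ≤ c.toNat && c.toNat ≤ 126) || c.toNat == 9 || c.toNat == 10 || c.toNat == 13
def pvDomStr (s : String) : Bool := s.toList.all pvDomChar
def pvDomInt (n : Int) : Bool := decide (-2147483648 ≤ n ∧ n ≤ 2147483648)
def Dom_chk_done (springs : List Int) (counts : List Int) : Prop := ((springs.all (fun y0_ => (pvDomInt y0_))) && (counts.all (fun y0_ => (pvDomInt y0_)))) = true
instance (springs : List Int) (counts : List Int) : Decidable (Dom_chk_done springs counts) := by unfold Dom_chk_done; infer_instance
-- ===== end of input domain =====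

-- B replaces A's accumulate-then-compare design by a single streaming pass that matches
-- each completed '#'-run against counts on the fly (cursor j + flag ok, no group list).

-- ===== PORT A =====
-- inner helper get_count: index loop over range(min(len,len)) with break
def getCountA (chk_list : List Int) (counts : List Int) (idx : Nat) : Int :=
  if idx < min chk_list.length counts.length then
    if chk_list.getD idx 0 ≠ counts.getD idx 0 then 0
    else 1 + getCountA chk_list counts (idx + 1)
  else 0
termination_by min chk_list.length counts.length - idx

-- the for-loop over springs with break; state (chk_list, hash_count, had_q)
def loopA : List Int → List Int → Int → List Int × Int × Bool
  | [], chk, hc => (chk, hc, false)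
  | c :: rest, chk, hc =>
    if c == 63 then (chk, 0, true)
    else if c == 35 then loopA rest chk (hc + 1)
    else if hc > 0 then loopA rest (chk ++ [hc]) 0
    else loopA rest chk hc

def chk_done (springs : List Int) (counts : List Int) : Bool × Int :=
  let r := loopA springs [] 0
  let chk_list := if r.2.1 > 0 then r.1 ++ [r.2.1] else r.1
  ((!r.2.2 && decide (counts = chk_list)), getCountA chk_list counts 0)

-- ===== PORT B =====
-- one matching step for a completed run g: advance j while ok, else clear ok
def stepB (counts : List Int) (j : Nat) (ok : Bool) (g : Int) : Nat × Bool :=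
  if ok && decide (j < counts.length) && (counts.getD j 0 == g) then (j + 1, true)
  else (j, false)

-- the streaming loop: state (j, ok, run); returns on '?' immediately
def loopB : List Int → List Int → Nat → Bool → Int → Bool × Int
  | [], counts, j, ok, run =>
    let s := if run > 0 then stepB counts j ok run else (j, ok)
    ((s.2 && decide (s.1 = counts.length)), (s.1 : Int))
  | c :: rest, counts, j, ok, run =>
    if c == 63 then (false, (j : Int))
    else if c == 35 then loopB rest counts j ok (run + 1)
    else if run > 0 then
      let s := stepB counts j ok run
      loopB rest counts s.1 s.2 0
    else loopB rest counts j ok run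

def chk_done_alt (springs : List Int) (counts : List Int) : Bool × Int :=
  loopB springs counts 0 true 0

-- ===== PRECONDITION & SPEC =====
def Spec_chk_done (springs : List Int) (counts : List Int) (out : Bool × Int) : Prop := out = chk_done_alt springs counts
instance (springs : List Int) (counts : List Int) (out : Bool × Int) : Decidable (Spec_chk_done springs counts out) := by unfold Spec_chk_done; infer_instance

-- ===== CLAIM (what is proved, stated in full; the proofs are below) =====
def Claim_equal_chk_done : Prop := ∀ (springs : List Int) (counts : List Int), Dom_chk_done springs counts → Spec_chk_done springs counts (chk_done springs counts)

-- ===== LEMMAS AND PROOFS =====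

-- proof-only helpers: the group list abstraction both ports are related to
def rleP : List Int → Int → Bool → List Int
  | [], run, keep => if keep && run > 0 then [run] else []
  | c :: rest, run, keep =>
    if c == 35 then rleP rest (run + 1) keep
    else if run > 0 then run :: rleP rest 0 keep
    else rleP rest run keep

def natPrefix : List Int → List Int → Nat
  | g :: gs, k :: ks => if g = k then 1 + natPrefix gs ks else 0
  | _, _ => 0

def foldStep (counts : List Int) (gs : List Int) (s : Nat × Bool) : Nat × Bool :=
  gs.foldl (fun s g => stepB counts s.1 s.2 g) s

-- A's get_count equals the common-prefix length
theorem getCountA_eq (chk_list counts : List Int) (idx : Nat) :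
    getCountA chk_list counts idx = (natPrefix (chk_list.drop idx) (counts.drop idx) : Int) := by
  fun_induction getCountA chk_list counts idx with
  | case1 idx h1 h2 =>
      have hc : idx < chk_list.length := by omega
      have hk : idx < counts.length := by omega
      rw [List.drop_eq_getElem_cons hc, List.drop_eq_getElem_cons hk]
      rw [List.getD_eq_getElem _ _ hc, List.getD_eq_getElem _ _ hk] at h2
      simp only [natPrefix]
      rw [if_neg h2]
      simp
  | case2 idx h1 h2 ih =>
      have hc : idx < chk_list.length := by omega
      have hk : idx < counts.length := by omega
      rw [List.drop_eq_getElem_cons hc, List.drop_eq_getElem_cons hk]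
      rw [List.getD_eq_getElem _ _ hc, List.getD_eq_getElem _ _ hk] at h2
      have h2' : chk_list[idx] = counts[idx] := not_not.mp h2
      simp only [natPrefix]
      rw [if_pos h2', ih]
      push_cast
      ring
  | case3 idx h =>
      have h' : chk_list.length ≤ idx ∨ counts.length ≤ idx := by omega
      rcases h' with hle | hle
      · simp [List.drop_eq_nil_of_le hle, natPrefix]
      · rw [List.drop_eq_nil_of_le hle]
        cases chk_list.drop idx <;> simp [natPrefix]

-- had_q flag of A's loop = whether '?' occurs in springs
theorem loopA_hadq (springs : List Int) (chk : List Int) (hc : Int) :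
    (loopA springs chk hc).2.2 = springs.contains 63 := by
  induction springs generalizing chk hc with
  | nil => simp [loopA]
  | cons c rest ih =>
      by_cases h63 : c = 63
      · subst h63; simp [loopA]
      · simp only [loopA, beq_iff_eq, if_neg h63, List.contains_cons]
        have : ((63 : Int) == c) = false := beq_eq_false_iff_ne.mpr (Ne.symm h63)
        rw [this, Bool.false_or]
        split
        · exact ih _ _
        · split <;> exact ih _ _

-- the finished chk_list of A's loop (with its post-loop append) = chk ++ rleP of the
-- prefix up to '?' (trailing run kept only when no '?')
theorem loopA_finish (springs chk : List Int) (hc : Int) :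
    (let r := loopA springs chk hc; if r.2.1 > 0 then r.1 ++ [r.2.1] else r.1) =
      chk ++ (match PySem.List.index? springs 63 with
              | some i => rleP (springs.take i) hc false
              | none => rleP springs hc true) := by
  induction springs generalizing chk hc with
  | nil =>
      simp only [loopA, PySem.List.index?, rleP]
      split <;> simp_all
  | cons c rest ih =>
      by_cases h63 : c = 63
      · subst h63
        rw [PySem.List.index?_cons_self]
        simp [loopA, rleP]
      · rw [PySem.List.index?_cons_of_ne rest h63]
        by_cases h35 : c = 35
        · subst h35
          have hA : loopA ((35 : Int) :: rest) chk hc = loopA rest chk (hc + 1) := by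
            simp [loopA]
          rw [hA, ih]
          cases hI : PySem.List.index? rest 63 with
          | some i =>
              simp only [Option.map_some, List.take_succ_cons]
              simp [rleP]
          | none => simp [rleP]
        · have hA : loopA (c :: rest) chk hc =
              if hc > 0 then loopA rest (chk ++ [hc]) 0 else loopA rest chk hc := by
            simp [loopA, h63, h35]
          rw [hA]
          by_cases hhc : hc > 0
          · rw [if_pos hhc, ih]
            cases hI : PySem.List.index? rest 63 with
            | some i =>
                simp only [Option.map_some, List.take_succ_cons]
                simp [rleP, h35, hhc]
            | none => simp [rleP, h35, hhc]
          · rw [if_neg hhc, ih]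
            cases hI : PySem.List.index? rest 63 with
            | some i =>
                simp only [Option.map_some, List.take_succ_cons]
                simp [rleP, h35, hhc]
            | none => simp [rleP, h35, hhc]

-- folding stepB from a dead state does nothing
theorem foldStep_false (counts gs : List Int) (j : Nat) :
    foldStep counts gs (j, false) = (j, false) := by
  induction gs with
  | nil => rfl
  | cons g gs ih => simp [foldStep, List.foldl_cons, stepB] at ih ⊢; exact ih

-- folding stepB from a live state computes the common-prefix length past j
theorem foldStep_true (counts gs : List Int) (j : Nat) :
    foldStep counts gs (j, true) =
      (j + natPrefix gs (counts.drop j), decide (natPrefix gs (counts.drop j) = gs.length)) := by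
  induction gs generalizing j with
  | nil => simp [foldStep, natPrefix]
  | cons g gs ih =>
      by_cases hj : j < counts.length
      · rw [List.drop_eq_getElem_cons hj]
        by_cases hm : counts[j] = g
        · have hstep : stepB counts j true g = (j + 1, true) := by
            simp [stepB, hj, hm]
          simp only [foldStep, List.foldl_cons] at ih ⊢
          rw [hstep, ih]
          simp only [natPrefix, if_pos hm.symm, Prod.mk.injEq, List.length_cons]
          refine ⟨by omega, Bool.decide_congr (by omega)⟩
        · have hstep : stepB counts j true g = (j, false) := by
            simp [stepB, hj, hm]
          simp only [foldStep, List.foldl_cons] at ih ⊢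
          rw [hstep]
          have := foldStep_false counts gs j
          simp only [foldStep] at this
          rw [this]
          have hm' : ¬ (g = counts[j]) := fun h => hm h.symm
          simp [natPrefix, hm']
      · have hd : counts.drop j = [] := List.drop_eq_nil_of_le (by omega)
        have hstep : stepB counts j true g = (j, false) := by
          simp [stepB]; omega
        simp only [foldStep, List.foldl_cons] at ih ⊢
        rw [hstep]
        have := foldStep_false counts gs j
        simp only [foldStep] at this
        rw [this, hd]
        simp [natPrefix]

-- full-prefix match of both lengths iff list equality
theorem natPrefix_eq_iff (gs counts : List Int) :
    (natPrefix gs counts = gs.length ∧ natPrefix gs counts = counts.length) ↔ gs = counts := by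
  induction gs generalizing counts with
  | nil => cases counts <;> simp [natPrefix]
  | cons g gs ih =>
      cases counts with
      | nil => simp [natPrefix]
      | cons k ks =>
          by_cases h : g = k
          · subst h
            rw [show natPrefix (g :: gs) (g :: ks) = 1 + natPrefix gs ks from by simp [natPrefix]]
            simp only [List.length_cons, List.cons.injEq, true_and]
            rw [← ih ks]
            omega
          · simp [natPrefix, h]

-- B's loop in terms of the group-list abstraction
theorem loopB_eq (springs counts : List Int) (j : Nat) (ok : Bool) (run : Int) :
    loopB springs counts j ok run =
      match PySem.List.index? springs 63 with
      | some i =>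
          (false, ((foldStep counts (rleP (springs.take i) run false) (j, ok)).1 : Int))
      | none =>
          let s := foldStep counts (rleP springs run true) (j, ok)
          ((s.2 && decide (s.1 = counts.length)), (s.1 : Int)) := by
  induction springs generalizing j ok run with
  | nil =>
      simp only [loopB, PySem.List.index?, rleP]
      by_cases hr : run > 0
      · simp [hr, foldStep, List.foldl_cons]
      · simp [hr, foldStep]
  | cons c rest ih =>
      by_cases h63 : c = 63
      · subst h63
        rw [PySem.List.index?_cons_self]
        simp [loopB, rleP, foldStep]
      · rw [PySem.List.index?_cons_of_ne rest h63]
        by_cases h35 : c = 35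
        · subst h35
          have hB : loopB ((35 : Int) :: rest) counts j ok run = loopB rest counts j ok (run + 1) := by
            simp [loopB]
          rw [hB, ih]
          cases hI : PySem.List.index? rest 63 with
          | some i =>
              simp only [Option.map_some, List.take_succ_cons]
              simp [rleP]
          | none => simp [rleP]
        · have hB : loopB (c :: rest) counts j ok run =
              if run > 0 then
                let s := stepB counts j ok run
                loopB rest counts s.1 s.2 0
              else loopB rest counts j ok run := by
            simp [loopB, h63, h35]
          rw [hB]
          by_cases hr : run > 0
          · rw [if_pos hr]
            simp only []
            rw [ih]
            cases hI : PySem.List.index? rest 63 with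
            | some i =>
                simp only [Option.map_some, List.take_succ_cons]
                simp [rleP, h35, hr, foldStep, List.foldl_cons]
            | none => simp [rleP, h35, hr, foldStep, List.foldl_cons]
          · rw [if_neg hr, ih]
            cases hI : PySem.List.index? rest 63 with
            | some i =>
                simp only [Option.map_some, List.take_succ_cons]
                simp [rleP, h35, hr]
            | none => simp [rleP, h35, hr]

-- '?' membership agrees with index? success
theorem contains_eq_index? (springs : List Int) :
    springs.contains 63 = (PySem.List.index? springs 63).isSome := by
  induction springs with
  | nil => simp [PySem.List.index?]
  | cons c rest ih =>
      by_cases h : c = 63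
      · subst h; rw [PySem.List.index?_cons_self]; simp
      · rw [PySem.List.index?_cons_of_ne rest h]
        simp only [List.contains_cons]
        have : ((63 : Int) == c) = false := beq_eq_false_iff_ne.mpr (Ne.symm h)
        rw [this, Bool.false_or, ih]
        cases PySem.List.index? rest 63 <;> simp

-- ===== VERDICT (by name: the statement is the Claim_ definition above) =====
theorem chk_done_spec : Claim_equal_chk_done := by
  intro springs counts _
  unfold Spec_chk_done chk_done chk_done_alt
  have hq := loopA_hadq springs [] 0
  have hf := loopA_finish springs [] 0
  have hb := loopB_eq springs counts 0 true 0
  rw [contains_eq_index?] at hq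
  simp only [] at hf
  cases h : PySem.List.index? springs 63 with
  | some i =>
      rw [h] at hq hf hb
      simp only [Option.isSome] at hq
      rw [hb]
      simp only [List.nil_append] at hf
      simp [hq, hf, getCountA_eq, foldStep_true]
  | none =>
      rw [h] at hq hf hb
      simp only [Option.isSome] at hq
      rw [hb]
      simp only [List.nil_append] at hf
      have hiff : (counts = rleP springs 0 true) ↔
          (natPrefix (rleP springs 0 true) counts = (rleP springs 0 true).length ∧
           natPrefix (rleP springs 0 true) counts = counts.length) := by
        rw [natPrefix_eq_iff]
        exact ⟨Eq.symm, Eq.symm⟩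
      simp only [hq, hf, foldStep_true, List.drop_zero, Nat.zero_add, Bool.not_false,
        Bool.true_and, Prod.mk.injEq]
      refine ⟨?_, by simp [getCountA_eq]⟩
      rw [Bool.decide_congr hiff]
      exact Bool.decide_and _ _
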